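-- pv_equiv track=rewrite | github.com/JakubSt15/COP | model_pytorch/prepare_data.py | get_attack_sample_from_predictions
-- ===== SOURCE A (Python) =====
-- def get_attack_sample_from_predictions(predictions, FRAME_SIZE=1000):
--     looking_for_start = True
--     looking_for_end = False
--     start_sample = None
--     end_sample = None
--     for id, pred in enumerate(predictions):
--         if pred == 1 and looking_for_start:
--             start_sample = id * FRAME_SIZE
--             looking_for_start = False
--             looking_for_end = True
--         if pred == 0 and looking_for_end:
--             end_sample = id * FRAME_SIZE
--             break
--
--     return start_sample, end_sample
-- ===== SOURCE B (Python) =====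
-- def get_attack_sample_from_predictions(predictions, FRAME_SIZE=1000):
--     # Build a run-length encoding: one (value, start_index) entry per maximal run.
--     runs = []
--     prev = None
--     first = True
--     for i, p in enumerate(predictions):
--         if first or p != prev:
--             runs.append((p, i))
--             prev = p
--             first = False
--     # Scan the runs: first run of 1s gives the start; the first 0-run after it gives the end.
--     start_sample = None
--     end_sample = None
--     it = iter(runs)
--     for v, i in it:
--         if v == 1:
--             start_sample = i * FRAME_SIZE
--             break
--     if start_sample is not None:
--         for v, i in it:
--             if v == 0:
--                 end_sample = i * FRAME_SIZE
--                 break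
--     return start_sample, end_sample
-- ===== Notes on version B (the rewrite author's own statement) =====
-- stated objective: alternative
-- what changed: Replaces the flag-driven single scan with a two-stage algorithm: first build a run-length encoding (one (value, start_index) entry per maximal run), then scan the run list for the first 1-run (start) and the first 0-run after it (end).
import Mathlib
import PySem

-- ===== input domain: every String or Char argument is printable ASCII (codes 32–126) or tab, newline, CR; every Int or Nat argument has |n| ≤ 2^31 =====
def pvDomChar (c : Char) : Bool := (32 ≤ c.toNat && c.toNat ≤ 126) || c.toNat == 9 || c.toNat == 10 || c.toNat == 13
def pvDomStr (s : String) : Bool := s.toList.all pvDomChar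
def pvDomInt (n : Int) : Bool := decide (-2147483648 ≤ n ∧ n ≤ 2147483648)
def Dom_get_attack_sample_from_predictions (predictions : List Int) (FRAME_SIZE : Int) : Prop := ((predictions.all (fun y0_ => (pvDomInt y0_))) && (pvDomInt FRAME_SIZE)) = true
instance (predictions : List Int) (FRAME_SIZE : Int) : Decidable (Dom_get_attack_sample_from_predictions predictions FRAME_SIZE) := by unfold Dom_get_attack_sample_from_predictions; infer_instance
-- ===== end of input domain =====

-- B replaces A's flag-driven scan with a run-length encoding built once, then a scan over runs (alternative decomposition, same cost).

-- ===== PORT A =====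
-- the for-loop over enumerate(predictions) with its mutable flags; `break` = immediate return
def pvALoop (FRAME_SIZE : Int) : List Int → Int → Bool → Bool → Option Int → Option Int → Option Int × Option Int
  | [], _, _, _, start_sample, end_sample => (start_sample, end_sample)
  | pred :: rest, id, looking_for_start, looking_for_end, start_sample, end_sample =>
    let start_sample' := if pred = 1 ∧ looking_for_start then some (id * FRAME_SIZE) else start_sample
    let looking_for_end' := if pred = 1 ∧ looking_for_start then true else looking_for_end
    let looking_for_start' := if pred = 1 ∧ looking_for_start then false else looking_for_start
    if pred = 0 ∧ looking_for_end' then (start_sample', some (id * FRAME_SIZE))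
    else pvALoop FRAME_SIZE rest (id + 1) looking_for_start' looking_for_end' start_sample' end_sample

def get_attack_sample_from_predictions (predictions : List Int) (FRAME_SIZE : Int) : Option Int × Option Int :=
  pvALoop FRAME_SIZE predictions 0 true false none none

-- ===== PORT B =====
-- Source B's first loop: build the run-length encoding; `prev = None` / `first` is the Option Int state
-- (for an Int p, `p != None` is always true, modelled by comparing against `none`).
def pvRuns : List Int → Nat → Option Int → List (Int × Nat)
  | [], _, _ => []
  | p :: rest, i, prev =>
    if some p ≠ prev then (p, i) :: pvRuns rest (i + 1) (some p)
    else pvRuns rest (i + 1) prev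

-- Source B's `for v, i in it: if v == target: break` over the (shared) run iterator:
-- returns the matching run's index together with the remaining runs.
def pvFindRun (v : Int) : List (Int × Nat) → Option (Nat × List (Int × Nat))
  | [] => none
  | (w, i) :: rest => if w = v then some (i, rest) else pvFindRun v rest

def get_attack_sample_from_predictions_alt (predictions : List Int) (FRAME_SIZE : Int) : Option Int × Option Int :=
  match pvFindRun 1 (pvRuns predictions 0 none) with
  | none => (none, none)
  | some (s, rest) =>
    match pvFindRun 0 rest with
    | none => (some ((s : Int) * FRAME_SIZE), none)
    | some (e, _) => (some ((s : Int) * FRAME_SIZE), some ((e : Int) * FRAME_SIZE))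

-- ===== PRECONDITION & SPEC =====
def Spec_get_attack_sample_from_predictions (predictions : List Int) (FRAME_SIZE : Int) (out : Option Int × Option Int) : Prop := out = get_attack_sample_from_predictions_alt predictions FRAME_SIZE
instance (predictions : List Int) (FRAME_SIZE : Int) (out : Option Int × Option Int) : Decidable (Spec_get_attack_sample_from_predictions predictions FRAME_SIZE out) := by unfold Spec_get_attack_sample_from_predictions; infer_instance

-- ===== CLAIM =====
def Claim_equal_get_attack_sample_from_predictions : Prop := ∀ (predictions : List Int) (FRAME_SIZE : Int), Dom_get_attack_sample_from_predictions predictions FRAME_SIZE → Spec_get_attack_sample_from_predictions predictions FRAME_SIZE (get_attack_sample_from_predictions predictions FRAME_SIZE)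

-- ===== LEMMAS AND PROOFS =====

-- step lemmas reducing one iteration of A's loop in each of its four relevant situations
theorem pvALoop_cons_one (F : Int) (rest : List Int) (i : Int) :
    pvALoop F (1 :: rest) i true false none none =
      pvALoop F rest (i + 1) false true (some (i * F)) none := by
  simp [pvALoop]

theorem pvALoop_cons_ne_one (F p : Int) (rest : List Int) (i : Int) (hp : p ≠ 1) :
    pvALoop F (p :: rest) i true false none none =
      pvALoop F rest (i + 1) true false none none := by
  simp [pvALoop, hp]

theorem pvALoop_cons_zero (F : Int) (rest : List Int) (i : Int) (s : Option Int) :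
    pvALoop F (0 :: rest) i false true s none = (s, some (i * F)) := by
  simp [pvALoop]

theorem pvALoop_cons_ne_zero (F p : Int) (rest : List Int) (i : Int) (s : Option Int)
    (hp : p ≠ 0) :
    pvALoop F (p :: rest) i false true s none =
      pvALoop F rest (i + 1) false true s none := by
  simp [pvALoop, hp]

-- Phase 2 of A's loop (looking_for_end): it returns (s, first 0 from here, scaled)
theorem pvALoop_phase2 (F : Int) (l : List Int) (i : Int) (s : Option Int) :
    pvALoop F l i false true s none =
      (s, Option.map (fun j : Nat => (i + (j : Int)) * F) (PySem.List.index? l 0)) := by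
  induction l generalizing i with
  | nil => simp [pvALoop, PySem.List.index?]
  | cons p rest ih =>
    by_cases hp : p = 0
    · subst hp
      rw [PySem.List.index?_cons_self, pvALoop_cons_zero]
      simp
    · rw [PySem.List.index?_cons_of_ne _ hp, pvALoop_cons_ne_zero F p rest i s hp, ih]
      cases PySem.List.index? rest 0 with
      | none => rfl
      | some j =>
        simp only [Option.map_some, Prod.mk.injEq, Option.some_inj, true_and]
        push_cast
        ring

-- Phase 1 of A's loop (looking_for_start): full characterisation via first occurrences
theorem pvALoop_phase1 (F : Int) (l : List Int) (i : Int) :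
    pvALoop F l i true false none none =
      match PySem.List.index? l 1 with
      | none => (none, none)
      | some k => (some ((i + (k : Int)) * F),
          Option.map (fun j : Nat => (i + (k : Int) + 1 + (j : Int)) * F)
            (PySem.List.index? (l.drop (k + 1)) 0)) := by
  induction l generalizing i with
  | nil => simp [pvALoop, PySem.List.index?]
  | cons p rest ih =>
    by_cases hp : p = 1
    · subst hp
      rw [PySem.List.index?_cons_self, pvALoop_cons_one, pvALoop_phase2]
      simp only [List.drop_succ_cons, List.drop_zero, Nat.cast_zero]
      cases PySem.List.index? rest 0 with
      | none =>
        simp only [Option.map_none, Prod.mk.injEq, Option.some_inj, and_true]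
        ring
      | some j =>
        simp only [Option.map_some, Prod.mk.injEq, Option.some_inj]
        exact ⟨by ring, by ring⟩
    · rw [PySem.List.index?_cons_of_ne _ hp, pvALoop_cons_ne_one F p rest i hp, ih]
      cases PySem.List.index? rest 1 with
      | none => rfl
      | some k =>
        simp only [Option.map_some, List.drop_succ_cons, Prod.mk.injEq, Option.some_inj]
        refine ⟨by push_cast; ring, ?_⟩
        cases PySem.List.index? (rest.drop (k + 1)) 0 with
        | none => rfl
        | some j =>
          simp only [Option.map_some, Option.some_inj]
          push_cast
          ring

-- B's run search: finding the first v-run in the runs of l (when the previous value is not v)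
-- is finding the first occurrence of v in l; the leftover runs are the runs of the tail after it.
theorem pvFindRun_runs (v : Int) (l : List Int) (i : Nat) (prev : Option Int)
    (hprev : prev ≠ some v) :
    pvFindRun v (pvRuns l i prev) =
      Option.map (fun k : Nat => (i + k, pvRuns (l.drop (k + 1)) (i + k + 1) (some v)))
        (PySem.List.index? l v) := by
  induction l generalizing i prev with
  | nil => simp [pvRuns, pvFindRun, PySem.List.index?]
  | cons p rest ih =>
    by_cases hp : p = v
    · subst hp
      have hne : some p ≠ prev := fun h => hprev h.symm
      rw [PySem.List.index?_cons_self]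
      simp [pvRuns, hne, pvFindRun]
    · have hprev' : some p ≠ some v := by simpa using hp
      rw [PySem.List.index?_cons_of_ne _ hp]
      have htail : pvFindRun v (pvRuns (p :: rest) i prev) =
          pvFindRun v (pvRuns rest (i + 1) (some p)) := by
        by_cases hpp : some p ≠ prev
        · simp [pvRuns, hpp, pvFindRun, hp]
        · simp only [ne_eq, not_not] at hpp
          subst hpp
          simp [pvRuns]
      rw [htail, ih (i + 1) (some p) hprev']
      cases PySem.List.index? rest v with
      | none => rfl
      | some k =>
        simp only [Option.map_some, List.drop_succ_cons, Option.some_inj, Prod.mk.injEq]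
        exact ⟨by omega, by rw [show i + (k + 1) + 1 = i + 1 + k + 1 by omega]⟩

-- ===== VERDICT =====
theorem get_attack_sample_from_predictions_spec : Claim_equal_get_attack_sample_from_predictions := by
  intro predictions FRAME_SIZE _
  unfold Spec_get_attack_sample_from_predictions get_attack_sample_from_predictions
    get_attack_sample_from_predictions_alt
  rw [pvALoop_phase1, pvFindRun_runs 1 predictions 0 none (by simp)]
  cases PySem.List.index? predictions 1 with
  | none => rfl
  | some k =>
    simp only [Option.map_some, Nat.zero_add]
    rw [pvFindRun_runs 0 (predictions.drop (k + 1)) (k + 1) (some 1) (by simp)]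
    cases PySem.List.index? (predictions.drop (k + 1)) 0 with
    | none =>
      simp only [Option.map_none, Prod.mk.injEq, Option.some_inj, and_true]
      ring
    | some j =>
      simp only [Option.map_some, Prod.mk.injEq, Option.some_inj]
      refine ⟨by ring, ?_⟩
      push_cast
      ring
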